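-- pv_equiv track=rewrite | github.com/andy2167565/leetcode | Hard/1231_divide-chocolate/divide-chocolate.py | maximizeSweetness
-- ===== SOURCE A (Python) =====
-- from typing import List
--
-- def maximizeSweetness(sweetness: List[int], k: int) -> int:
--     # Reference: https://leetcode.com/problems/divide-chocolate/solutions/408503/java-c-python-binary-search/
--     l, r = 1, sum(sweetness) // (k + 1)
--     while l < r:
--         mid = (l + r + 1) // 2
--         curr = cuts = 0
--         for i in sweetness:
--             curr += i
--             if curr >= mid:
--                 cuts += 1
--                 curr = 0
--         if cuts > k:
--             l = mid
--         else:
--             r = mid - 1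
--     return r
-- ===== SOURCE B (Python) =====
-- from typing import List
--
-- def maximizeSweetness(sweetness: List[int], k: int) -> int:
--     # Same binary search as the reference (its exact value on arbitrary int input
--     # pins the probe sequence), but written recursively, and the feasibility test
--     # counts DOWN the pieces still needed and exits early instead of counting all
--     # cuts and comparing at the end.
--     total = sum(sweetness)
--
--     def feasible(m: int) -> bool:
--         need = k + 1
--         curr = 0
--         for x in sweetness:
--             if need <= 0:
--                 return True
--             curr += x
--             if curr >= m:
--                 need -= 1
--                 curr = 0
--         return need <= 0
--
--     def search(lo: int, hi: int) -> int:
--         if lo >= hi: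
--             return hi
--         mid = (lo + hi + 1) // 2
--         if feasible(mid):
--             return search(mid, hi)
--         return search(lo, mid - 1)
--
--     return search(1, total // (k + 1))
-- ===== Notes on version B (the rewrite author's own statement) =====
-- stated objective: alternative
-- what changed: Same binary search on the answer (its exact value on arbitrary, possibly negative input pins the probe sequence), but restructured: the search is recursive instead of a while-loop, and the feasibility test counts down the pieces still needed with an early exit instead of counting all cuts and comparing at the end.
import Mathlib
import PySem

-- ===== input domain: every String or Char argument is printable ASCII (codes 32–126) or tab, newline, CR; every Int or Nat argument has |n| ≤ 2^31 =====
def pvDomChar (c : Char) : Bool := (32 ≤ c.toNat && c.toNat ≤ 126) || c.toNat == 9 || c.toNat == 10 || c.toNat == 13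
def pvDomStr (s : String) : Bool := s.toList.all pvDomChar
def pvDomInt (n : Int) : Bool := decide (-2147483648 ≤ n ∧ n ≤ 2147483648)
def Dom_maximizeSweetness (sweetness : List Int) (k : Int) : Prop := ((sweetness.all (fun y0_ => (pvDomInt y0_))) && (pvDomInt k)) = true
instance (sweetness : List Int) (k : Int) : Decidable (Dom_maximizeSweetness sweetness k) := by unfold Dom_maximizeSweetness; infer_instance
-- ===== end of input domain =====

-- B keeps A's exact binary search (its value on arbitrary int input pins the probe sequence)
-- but is a different decomposition: recursive search, and a countdown/early-exit feasibility
-- test instead of counting all cuts; objective: alternative.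

-- ===== PORT A =====
-- the body of 'for i in sweetness' updating (curr, cuts)
def pvBodyA (mid : Int) (s : Int × Int) (i : Int) : Int × Int :=
  let curr := s.1 + i
  if curr ≥ mid then (0, s.2 + 1) else (curr, s.2)

-- the 'while l < r' loop of A; fuel only makes the recursion structural: (r - l).toNat
-- iterations always suffice (the interval shrinks each pass), so fuel-out coincides with loop exit
def pvWhileA (sweetness : List Int) (k : Int) (fuel : Nat) (l r : Int) : Int :=
  match fuel with
  | 0 => r
  | fuel + 1 =>
    if l < r then
      let mid := PySem.Int.floordiv (l + r + 1) 2
      let res := sweetness.foldl (pvBodyA mid) (0, 0)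
      if res.2 > k then pvWhileA sweetness k fuel mid r
      else pvWhileA sweetness k fuel l (mid - 1)
    else r

def maximizeSweetness (sweetness : List Int) (k : Int) : Int :=
  let r := PySem.Int.floordiv sweetness.sum (k + 1)
  pvWhileA sweetness k (r - 1).toNat 1 r

-- ===== PORT B =====
-- Source B's feasible(m): walk the list counting DOWN the pieces still needed, early exit
def pvFeasibleB (m : Int) (xs : List Int) (curr need : Int) : Bool :=
  match xs with
  | [] => need ≤ 0
  | x :: rest =>
    if need ≤ 0 then true
    else
      let c := curr + x
      if c ≥ m then pvFeasibleB m rest 0 (need - 1)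
      else pvFeasibleB m rest c need

-- Source B's recursive search(lo, hi); fuel only makes the recursion structural, as in port A
def pvSearchB (sweetness : List Int) (k : Int) (fuel : Nat) (lo hi : Int) : Int :=
  match fuel with
  | 0 => hi
  | fuel + 1 =>
    if lo < hi then
      let mid := PySem.Int.floordiv (lo + hi + 1) 2
      if pvFeasibleB mid sweetness 0 (k + 1) then pvSearchB sweetness k fuel mid hi
      else pvSearchB sweetness k fuel lo (mid - 1)
    else hi

def maximizeSweetness_alt (sweetness : List Int) (k : Int) : Int :=
  let hi := PySem.Int.floordiv sweetness.sum (k + 1)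
  pvSearchB sweetness k (hi - 1).toNat 1 hi

-- ===== PRECONDITION & SPEC =====
-- Pre_ excludes only k = -1, where Python A raises ZeroDivisionError on 'sum(sweetness) // (k + 1)'.
def Pre_maximizeSweetness (sweetness : List Int) (k : Int) : Prop := k ≠ -1
instance (sweetness : List Int) (k : Int) : Decidable (Pre_maximizeSweetness sweetness k) := by unfold Pre_maximizeSweetness; infer_instance
def pvWitness_maximizeSweetness : List Int × Int := ([1, 2, 3], 1)

def Spec_maximizeSweetness (sweetness : List Int) (k : Int) (out : Int) : Prop := out = maximizeSweetness_alt sweetness k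
instance (sweetness : List Int) (k : Int) (out : Int) : Decidable (Spec_maximizeSweetness sweetness k out) := by unfold Spec_maximizeSweetness; infer_instance

-- ===== CLAIM (what is proved, stated in full; the proofs are below) =====
def Claim_equal_maximizeSweetness : Prop := ∀ (sweetness : List Int) (k : Int), Dom_maximizeSweetness sweetness k → Pre_maximizeSweetness sweetness k → Spec_maximizeSweetness sweetness k (maximizeSweetness sweetness k)

-- ===== LEMMAS AND PROOFS =====

-- A's cut count never decreases along the fold
lemma pvCutsA_mono (m : Int) (xs : List Int) (s : Int × Int) :
    s.2 ≤ (xs.foldl (pvBodyA m) s).2 := by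
  induction xs generalizing s with
  | nil => simp
  | cons x rest ih =>
    simp only [List.foldl_cons]
    have := ih (pvBodyA m s x)
    have hb : s.2 ≤ (pvBodyA m s x).2 := by
      simp only [pvBodyA]; split <;> simp
    omega

-- B's countdown test computes exactly "A's final cut count exceeds k"
lemma pvFeas_eq (m k : Int) (xs : List Int) (curr cuts : Int) :
    pvFeasibleB m xs curr (k + 1 - cuts)
      = decide (k < (xs.foldl (pvBodyA m) (curr, cuts)).2) := by
  induction xs generalizing curr cuts with
  | nil =>
    simp only [pvFeasibleB, List.foldl_nil]
    rcases Decidable.em (k < cuts) with h | h <;> simp [h]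
  | cons x rest ih =>
    simp only [pvFeasibleB, List.foldl_cons]
    by_cases h0 : k + 1 - cuts ≤ 0
    · have hmono := pvCutsA_mono m rest (pvBodyA m (curr, cuts) x)
      have hb : cuts ≤ (pvBodyA m (curr, cuts) x).2 := by
        simp only [pvBodyA]; split <;> simp
      simp only [if_pos h0]
      symm; rw [decide_eq_true_iff]; omega
    · simp only [if_neg h0, pvBodyA]
      by_cases hc : curr + x ≥ m
      · simp only [if_pos hc]
        have : k + 1 - cuts - 1 = k + 1 - (cuts + 1) := by ring
        rw [this, ih]
      · simp only [if_neg hc]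
        exact ih _ _

lemma pvCond_eq (sweetness : List Int) (k m : Int) :
    pvFeasibleB m sweetness 0 (k + 1)
      = decide (k < (sweetness.foldl (pvBodyA m) (0, 0)).2) := by
  have := pvFeas_eq m k sweetness 0 0
  simpa using this

lemma pvLoop_eq (sweetness : List Int) (k : Int) (fuel : Nat) :
    ∀ (l r : Int), pvWhileA sweetness k fuel l r = pvSearchB sweetness k fuel l r := by
  induction fuel with
  | zero => intro l r; rfl
  | succ fuel ih =>
    intro l r
    rw [pvWhileA, pvSearchB]
    by_cases h : l < r
    · simp only [if_pos h]
      rw [pvCond_eq]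
      by_cases hgt : k < (sweetness.foldl (pvBodyA (PySem.Int.floordiv (l + r + 1) 2)) (0, 0)).2
      · rw [if_pos hgt, if_pos (decide_eq_true hgt), ih]
      · rw [if_neg hgt, if_neg (by simpa using hgt), ih]
    · rw [if_neg h, if_neg h]

-- ===== VERDICT (by name: the statement is the Claim_ definition above) =====
theorem maximizeSweetness_spec : Claim_equal_maximizeSweetness := by
  intro sweetness k _ _
  unfold Spec_maximizeSweetness maximizeSweetness maximizeSweetness_alt
  exact pvLoop_eq sweetness k _ 1 _
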